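-- pv_equiv track=rewrite | github.com/Chamoswor/milk-lab-automation | python/handlers/plc_handler.py | _iter_skinne_dint_addresses
-- ===== SOURCE A (Python) =====
-- SKINNE_LENGTH = 10 # Antall elementer i en skinne-liste
--
-- def _iter_skinne_dint_addresses(base_offset: int, count: int = SKINNE_LENGTH):
--     """
--     Hjelpefunksjon for å iterere over de spesifikke (x, y) DINT-adressene for skinner.
--     Yields: (byte_offset, bit_offset_within_byte)
--     """
--     x = base_offset
--     y = 0
--     for _ in range(count):
--         yield x, y
--         y += 1
--         if y >= 8: # Etter at 8 bit-offsets (0-7) er brukt for en byte_offset (x)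
--             x += 1
--             y = 0
-- ===== SOURCE B (Python) =====
-- SKINNE_LENGTH = 10 # Antall elementer i en skinne-liste
--
-- def _iter_skinne_dint_addresses(base_offset: int, count: int = SKINNE_LENGTH):
--     """Yield (byte_offset, bit_offset) pairs computed directly from the index."""
--     for i in range(count):
--         q, r = divmod(i, 8)
--         yield base_offset + q, r
-- ===== Notes on version B (the rewrite author's own statement) =====
-- stated objective: simpler
-- what changed: Replaced the mutable (x, y) counters and the carry-reset branch with a stateless loop that computes each (byte, bit) pair directly from the index via divmod(i, 8).
import Mathlib
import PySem

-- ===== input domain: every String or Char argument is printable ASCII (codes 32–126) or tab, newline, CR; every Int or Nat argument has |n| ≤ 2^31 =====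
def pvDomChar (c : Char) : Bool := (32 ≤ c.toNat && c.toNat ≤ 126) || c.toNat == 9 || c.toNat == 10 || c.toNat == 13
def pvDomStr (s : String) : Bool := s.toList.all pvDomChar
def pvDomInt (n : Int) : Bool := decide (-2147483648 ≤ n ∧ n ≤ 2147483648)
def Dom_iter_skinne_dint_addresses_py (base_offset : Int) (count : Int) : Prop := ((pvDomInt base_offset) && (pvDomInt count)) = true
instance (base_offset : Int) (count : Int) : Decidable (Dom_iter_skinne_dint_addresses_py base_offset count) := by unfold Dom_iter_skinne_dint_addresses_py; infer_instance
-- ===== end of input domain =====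

-- B replaces A's mutable (x, y) counters and carry branch with a direct index → (byte, bit) divmod computation (objective: simpler).

-- ===== PORT A =====
-- loop body of A: yield (x, y); y += 1; if y >= 8: x += 1; y = 0.  State: (x, y, yielded list).
def pvStepA (s : Int × Int × List (Int × Int)) (_i : Int) : Int × Int × List (Int × Int) :=
  let x := s.1
  let y := s.2.1
  let acc := s.2.2 ++ [(x, y)]
  let y' := y + 1
  if y' ≥ 8 then (x + 1, 0, acc) else (x, y', acc)

def iter_skinne_dint_addresses_py (base_offset : Int) (count : Int) : List (Int × Int) :=
  ((PySem.List.pyRange 0 count 1).foldl pvStepA (base_offset, 0, [])).2.2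

-- ===== PORT B =====
def iter_skinne_dint_addresses_py_alt (base_offset : Int) (count : Int) : List (Int × Int) :=
  (PySem.List.pyRange 0 count 1).map
    (fun i => (base_offset + PySem.Int.floordiv i 8, PySem.Int.mod i 8))

-- ===== PRECONDITION & SPEC =====
def Spec_iter_skinne_dint_addresses_py (base_offset : Int) (count : Int) (out : List (Int × Int)) : Prop := out = iter_skinne_dint_addresses_py_alt base_offset count
instance (base_offset : Int) (count : Int) (out : List (Int × Int)) : Decidable (Spec_iter_skinne_dint_addresses_py base_offset count out) := by unfold Spec_iter_skinne_dint_addresses_py; infer_instance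

-- ===== CLAIM (what is proved, stated in full; the proofs are below) =====
def Claim_equal_iter_skinne_dint_addresses_py : Prop := ∀ (base_offset : Int) (count : Int), Dom_iter_skinne_dint_addresses_py base_offset count → Spec_iter_skinne_dint_addresses_py base_offset count (iter_skinne_dint_addresses_py base_offset count)

-- ===== LEMMAS AND PROOFS =====

-- Invariant: after n steps A's state is (base + n/8, n%8) and its output is B's output so far.
theorem pvFoldA_invariant (b : Int) (n : Nat) :
    (PySem.List.pyRange 0 (n : Int) 1).foldl pvStepA (b, 0, []) =
      (b + ((n / 8 : Nat) : Int), ((n % 8 : Nat) : Int),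
        (PySem.List.pyRange 0 (n : Int) 1).map
          (fun i => (b + PySem.Int.floordiv i 8, PySem.Int.mod i 8))) := by
  induction n with
  | zero => simp [PySem.List.pyRange_one_eq_nil]
  | succ n ih =>
    have h0 : (0 : Int) ≤ (n : Int) := by exact_mod_cast Nat.zero_le n
    have hsplit : PySem.List.pyRange 0 ((n : Int) + 1) 1 =
        PySem.List.pyRange 0 (n : Int) 1 ++ [(n : Int)] :=
      PySem.List.pyRange_one_succ_right h0
    have hcast : ((n + 1 : Nat) : Int) = (n : Int) + 1 := by push_cast; ring
    rw [hcast, hsplit, List.foldl_append, ih, List.map_append]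
    simp only [List.foldl_cons, List.foldl_nil, List.map_cons, List.map_nil]
    have hfd : PySem.Int.floordiv (n : Int) 8 = ((n / 8 : Nat) : Int) := by
      exact_mod_cast PySem.Int.floordiv_natCast n 8
    have hmd : PySem.Int.mod (n : Int) 8 = ((n % 8 : Nat) : Int) := by
      exact_mod_cast PySem.Int.mod_natCast n 8
    unfold pvStepA
    simp only [hfd, hmd]
    split_ifs with h
    · have hq : (n + 1) / 8 = n / 8 + 1 := by omega
      have hr : (n + 1) % 8 = 0 := by omega
      rw [hq, hr]
      simp only [Prod.mk.injEq, and_true]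
      omega
    · have hq : (n + 1) / 8 = n / 8 := by omega
      have hr : (n + 1) % 8 = n % 8 + 1 := by omega
      rw [hq, hr]
      simp only [Prod.mk.injEq, and_true]
      refine ⟨trivial, ?_⟩
      push_cast
      ring

-- ===== VERDICT (by name: the statement is the Claim_ definition above) =====
theorem iter_skinne_dint_addresses_py_spec : Claim_equal_iter_skinne_dint_addresses_py := by
  intro b c _
  unfold Spec_iter_skinne_dint_addresses_py iter_skinne_dint_addresses_py
    iter_skinne_dint_addresses_py_alt
  by_cases hc : c ≤ 0
  · rw [PySem.List.pyRange_one_eq_nil hc]; simp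
  · have hc' : c = ((c.toNat : Nat) : Int) := by omega
    rw [hc', pvFoldA_invariant]
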